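-- pv_equiv track=rewrite | github.com/dawoodaijaz97/Leetcode | count-the-number-of-computer-unlocking-permutations/solution.py | solve
-- ===== SOURCE A (Python) =====
-- MOD = 10**9 + 7
--
-- def solve(complexity: list[int]) -> int:
--     n = len(complexity)
--     dp = [0] * n
--     dp[0] = 1
--
--     # Sort indices by complexity
--     sorted_indices = sorted(range(n), key=lambda x: (complexity[x], x))
--
--     for i in range(1, n):
--         for j in range(i):
--             if complexity[sorted_indices[j]] < complexity[sorted_indices[i]]:
--                 dp[sorted_indices[i]] = (dp[sorted_indices[i]] + dp[sorted_indices[j]]) % MOD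
--
--     # Sum up all valid permutations starting with 0
--     return sum(dp) % MOD
-- ===== SOURCE B (Python) =====
-- MOD = 10**9 + 7
--
-- def solve(complexity: list[int]) -> int:
--     # answer = product of (count(v) + 1) over the distinct values v above the first element, mod MOD
--     c0 = complexity[0]
--     counts = {}
--     for v in complexity:
--         counts[v] = counts.get(v, 0) + 1
--     ans = 1
--     for v, c in counts.items():
--         if v > c0:
--             ans = ans * (c + 1) % MOD
--     return ans
-- ===== Notes on version B (the rewrite author's own statement) =====
-- stated objective: faster
-- what changed: Replaced the O(n^2) dp over complexity-sorted indices by a closed-form product: the answer equals the product of (count(v)+1) over the distinct values v greater than the first element, computed with one counting pass over a dict.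
import Mathlib
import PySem

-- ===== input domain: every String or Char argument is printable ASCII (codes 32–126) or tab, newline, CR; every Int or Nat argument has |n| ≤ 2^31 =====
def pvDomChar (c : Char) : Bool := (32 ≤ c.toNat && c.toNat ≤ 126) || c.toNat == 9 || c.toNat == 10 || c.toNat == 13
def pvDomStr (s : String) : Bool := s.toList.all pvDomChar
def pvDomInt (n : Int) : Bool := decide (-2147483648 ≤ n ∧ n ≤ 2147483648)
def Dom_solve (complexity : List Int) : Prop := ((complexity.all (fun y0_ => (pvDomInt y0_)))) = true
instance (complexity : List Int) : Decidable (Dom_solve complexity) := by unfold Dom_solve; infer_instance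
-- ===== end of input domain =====

-- B replaces A's O(n^2) dp over complexity-sorted indices by a closed-form product
-- (count(v)+1 over the distinct values v above the first element) in one counting pass.

-- ===== PORT A =====
def pvMOD : Int := 1000000007   -- MOD = 10**9 + 7

-- literal transliteration of A; indices fed to pyGetD/pySetD come from range(n)
-- or from the sorted permutation of range(n), hence are always in range; the only
-- raising statement is dp[0] = 1 on the empty list, excluded by Pre_solve.
def solve (complexity : List Int) : Int :=
  let n : Int := (complexity.length : Int)
  let dp0 : List Int := List.replicate complexity.length 0          -- dp = [0] * n
  let dp1 : List Int := PySem.List.pySetD dp0 0 1                   -- dp[0] = 1 (IndexError on []: see Pre_solve)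
  let sortedIndices : List Int :=                                   -- sorted(range(n), key=lambda x: (complexity[x], x))
    PySem.List.sorted2 (PySem.List.pyRange 0 n 1)
      (fun x => PySem.List.pyGetD complexity x 0) (fun x => x)
  let dp2 : List Int :=
    (PySem.List.pyRange 1 n 1).foldl (fun dp i =>
      (PySem.List.pyRange 0 i 1).foldl (fun dp j =>
        if PySem.List.pyGetD complexity (PySem.List.pyGetD sortedIndices j 0) 0 <
           PySem.List.pyGetD complexity (PySem.List.pyGetD sortedIndices i 0) 0 then
          PySem.List.pySetD dp (PySem.List.pyGetD sortedIndices i 0)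
            (PySem.Int.mod (PySem.List.pyGetD dp (PySem.List.pyGetD sortedIndices i 0) 0 +
                            PySem.List.pyGetD dp (PySem.List.pyGetD sortedIndices j 0) 0) pvMOD)
        else dp) dp) dp1
  PySem.Int.mod dp2.sum pvMOD                                       -- return sum(dp) % MOD

-- ===== PORT B =====
-- literal transliteration of Source B
def solve_alt (complexity : List Int) : Int :=
  let c0 : Int := PySem.List.pyGetD complexity 0 0                  -- c0 = complexity[0] (IndexError on []: see Pre_solve)
  let counts : PySem.Dict Int Int :=                                -- counts[v] = counts.get(v, 0) + 1
    complexity.foldl (fun d v => d.insert v (d.getD v 0 + 1)) PySem.Dict.empty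
  counts.items.foldl (fun ans p =>                                  -- for v, c in counts.items(): ...
    if p.1 > c0 then PySem.Int.mod (ans * (p.2 + 1)) pvMOD else ans) 1

-- ===== PRECONDITION & SPEC =====
-- Pre_ excludes only the empty list, on which both A and B raise IndexError.
def Pre_solve (complexity : List Int) : Prop := complexity ≠ []
instance (complexity : List Int) : Decidable (Pre_solve complexity) := by unfold Pre_solve; infer_instance

def pvWitness_solve : List Int := [2, 1, 2]

def Spec_solve (complexity : List Int) (out : Int) : Prop := out = solve_alt complexity
instance (complexity : List Int) (out : Int) : Decidable (Spec_solve complexity out) := by unfold Spec_solve; infer_instance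

-- ===== CLAIM (what is proved, stated in full; the proofs are below) =====
def Claim_equal_solve : Prop := ∀ (complexity : List Int), Dom_solve complexity → Pre_solve complexity → Spec_solve complexity (solve complexity)

-- ===== LEMMAS AND PROOFS =====

-- ---- the mathematical model of A's dp array, per sorted position ----

-- value of entry at sorted position p, and the dp seed there (1 iff it is original index 0)
def pvVal (c σ : List Int) (p : Nat) : Int := PySem.List.pyGetD c (σ.getD p 0) 0
def pvBase (σ : List Int) (p : Nat) : Int := if σ.getD p 0 = 0 then 1 else 0

-- dp values of the first p sorted positions (A computes them left to right)
def pvD (c σ : List Int) : Nat → List Int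
  | 0 => []
  | p + 1 => pvD c σ p ++
      [PySem.Int.mod (pvBase σ p +
        ((List.range p).map (fun j => if pvVal c σ j < pvVal c σ p then (pvD c σ p).getD j 0 else 0)).sum) pvMOD]

def pvDval (c σ : List Int) (p : Nat) : Int :=
  PySem.Int.mod (pvBase σ p +
    ((List.range p).map (fun j => if pvVal c σ j < pvVal c σ p then (pvD c σ p).getD j 0 else 0)).sum) pvMOD

-- "value v is below the (optional) bound w"
def pvLtW (v : Int) (w : Option Int) : Bool := match w with | none => true | some b => decide (v < b)

-- the closed-form product: over distinct values u of s with c0 < u (< w)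
def pvG (c0 : Int) (s : List Int) (w : Option Int) : Int :=
  ∏ u ∈ s.toFinset.filter (fun u => c0 < u ∧ pvLtW u w = true), ((s.count u : Int) + 1)

-- A's sorted index permutation
def pvSigma (c : List Int) : List Int :=
  PySem.List.sorted2 (PySem.List.pyRange 0 (c.length : Int) 1)
    (fun x => PySem.List.pyGetD c x 0) (fun x => x)

-- ---- basic facts ----

theorem pvMOD_pos : (0 : Int) < pvMOD := by norm_num [pvMOD]

theorem pvD_length (c σ : List Int) (p : Nat) : (pvD c σ p).length = p := by
  induction p with
  | zero => rfl
  | succ p ih => simp [pvD, ih]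

theorem pvD_succ (c σ : List Int) (p : Nat) :
    pvD c σ (p + 1) = pvD c σ p ++ [pvDval c σ p] := rfl

theorem pvD_getD (c σ : List Int) {q j : Nat} (h : j < q) :
    (pvD c σ q).getD j 0 = pvDval c σ j := by
  induction q with
  | zero => omega
  | succ p ih =>
    rw [pvD_succ]
    rcases Nat.lt_or_ge j p with hj | hj
    · rw [List.getD_append _ _ _ _ (by simpa [pvD_length] using hj)]
      exact ih hj
    · have hjp : j = p := by omega
      subst hjp
      rw [List.getD_append_right _ _ _ _ (by simp [pvD_length])]
      simp [pvD_length]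

theorem pvBase_nonneg (σ : List Int) (p : Nat) : 0 ≤ pvBase σ p := by
  unfold pvBase; split <;> norm_num

theorem pvBase_lt (σ : List Int) (p : Nat) : pvBase σ p < pvMOD := by
  unfold pvBase; split <;> norm_num [pvMOD]

-- a list of ints is the getD-image of its index range
theorem int_list_eq_map_range (l : List Int) :
    l = (List.range l.length).map (fun i => l.getD i 0) := by
  apply List.ext_getElem
  · simp
  · intro i h1 h2
    simp [List.getD_eq_getElem?_getD, List.getElem?_eq_getElem h1]

-- a stepwise-modded fold is the mod of the plain sum
theorem pvFoldMod (l : List Int) (p : Int → Prop) [DecidablePred p] (g : Int → Int) (a : Int)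
    (ha0 : 0 ≤ a) (ha1 : a < pvMOD) :
    l.foldl (fun acc j => if p j then PySem.Int.mod (acc + g j) pvMOD else acc) a
      = PySem.Int.mod (a + (l.map (fun j => if p j then g j else 0)).sum) pvMOD := by
  induction l generalizing a with
  | nil => simp [PySem.Int.mod_eq_emod_of_pos pvMOD_pos, Int.emod_eq_of_lt ha0 ha1]
  | cons j l ih =>
    simp only [List.foldl_cons, List.map_cons, List.sum_cons]
    by_cases hp : p j
    · rw [if_pos hp, if_pos hp,
        ih _ (PySem.Int.mod_nonneg _ pvMOD_pos) (PySem.Int.mod_lt _ pvMOD_pos)]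
      rw [PySem.Int.mod_eq_emod_of_pos pvMOD_pos, PySem.Int.mod_eq_emod_of_pos pvMOD_pos,
        PySem.Int.mod_eq_emod_of_pos pvMOD_pos, Int.emod_add_emod]
      ring_nf
    · rw [if_neg hp, if_neg hp, ih _ ha0 ha1, zero_add]

-- a stepwise-modded product fold is the mod of the plain product
theorem pvFoldModMul (l : List Int) (p : Int → Prop) [DecidablePred p] (g : Int → Int) (a : Int)
    (ha0 : 0 ≤ a) (ha1 : a < pvMOD) :
    l.foldl (fun acc u => if p u then PySem.Int.mod (acc * g u) pvMOD else acc) a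
      = PySem.Int.mod (a * ((l.filter (fun u => decide (p u))).map g).prod) pvMOD := by
  induction l generalizing a with
  | nil => simp [PySem.Int.mod_eq_emod_of_pos pvMOD_pos, Int.emod_eq_of_lt ha0 ha1]
  | cons u l ih =>
    simp only [List.foldl_cons, List.filter_cons]
    by_cases hp : p u
    · rw [if_pos hp, if_pos (by simpa using hp),
        ih _ (PySem.Int.mod_nonneg _ pvMOD_pos) (PySem.Int.mod_lt _ pvMOD_pos)]
      simp only [List.map_cons, List.prod_cons]
      rw [PySem.Int.mod_eq_emod_of_pos pvMOD_pos, PySem.Int.mod_eq_emod_of_pos pvMOD_pos,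
        PySem.Int.mod_eq_emod_of_pos pvMOD_pos]
      conv_lhs => rw [Int.mul_emod, Int.emod_emod_of_dvd _ (dvd_refl _), ← Int.mul_emod]
      ring_nf
    · rw [if_neg hp, if_neg (by simpa using hp), ih _ ha0 ha1]

-- ---- facts about the sorted permutation ----

theorem pvSigma_perm (c : List Int) :
    (pvSigma c).Perm (PySem.List.pyRange 0 (c.length : Int) 1) :=
  PySem.List.sorted2_perm _ _ _ _

theorem pvSigma_length (c : List Int) : (pvSigma c).length = c.length := by
  have := (pvSigma_perm c).length_eq
  simpa [PySem.List.length_pyRange_one] using this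

theorem pvSigma_nodup (c : List Int) : (pvSigma c).Nodup :=
  ((pvSigma_perm c).nodup_iff).mpr (PySem.List.nodup_pyRange_one _ _)

theorem pvSigma_mem (c : List Int) {x : Int} (hx : x ∈ pvSigma c) :
    0 ≤ x ∧ x < (c.length : Int) := by
  have := ((pvSigma_perm c).mem_iff).mp hx
  simpa [PySem.List.mem_pyRange_one] using this

-- sorted2 with two linear-order keys is sorted with the lexicographic key
theorem sorted2_eq_sorted_toLex {α : Type} (xs : List α) (k1 k2 : α → Int) :
    PySem.List.sorted2 xs k1 k2 false
      = PySem.List.sorted xs (fun x => (toLex (k1 x, k2 x) : Int ×ₗ Int)) false := by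
  simp only [PySem.List.sorted2, PySem.List.sorted, if_neg (by decide : ¬ (false = true))]
  congr 1
  funext acc x
  congr 1
  funext a b
  simp only [Prod.Lex.lt_iff, ofLex_toLex]
  rcases lt_trichotomy (k1 a) (k1 b) with h | h | h
  · simp [h]
  · simp [h]
  · simp [h, not_lt_of_gt h, h.ne']

theorem pvSigma_val_mono (c : List Int) {j p : Nat} (hj : j ≤ p) (hp : p < (pvSigma c).length) :
    pvVal c (pvSigma c) j ≤ pvVal c (pvSigma c) p := by
  rcases Nat.lt_or_ge j p with hjp | hjp
  · have hpair : (pvSigma c).Pairwise (fun a b =>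
        (toLex (PySem.List.pyGetD c a 0, a) : Int ×ₗ Int) ≤ toLex (PySem.List.pyGetD c b 0, b)) := by
      have := PySem.List.sorted_pairwise (PySem.List.pyRange 0 (c.length : Int) 1)
        (fun x => (toLex (PySem.List.pyGetD c x 0, x) : Int ×ₗ Int))
      rw [← sorted2_eq_sorted_toLex] at this
      exact this
    have hle := (List.pairwise_iff_getElem.mp hpair) j p (by omega) hp hjp
    have h1 : (pvSigma c).getD j 0 = (pvSigma c)[j] := List.getD_eq_getElem _ _ (by omega)
    have h2 : (pvSigma c).getD p 0 = (pvSigma c)[p] := List.getD_eq_getElem _ _ hp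
    have h' := Prod.Lex.le_iff.mp hle
    simp only [ofLex_toLex] at h'
    rcases h' with h | h
    · unfold pvVal; rw [h1, h2]; exact le_of_lt h
    · unfold pvVal; rw [h1, h2, h.1]
  · have : j = p := by omega
    subst this; exact le_refl _

-- ---- Layer 1: solve computes the model ----

theorem pvGetSet (dp : List Int) (x y v : Int) (hx : 0 ≤ x) (hx2 : x < (dp.length : Int))
    (hy : 0 ≤ y) (hy2 : y < (dp.length : Int)) :
    PySem.List.pyGetD (PySem.List.pySetD dp x v) y 0
      = if y = x then v else PySem.List.pyGetD dp y 0 := by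
  rw [PySem.List.pySetD_of_nonneg dp v hx,
    PySem.List.pyGetD_eq_getElem _ 0 hy (by simpa using hy2),
    PySem.List.pyGetD_eq_getElem _ 0 hy hy2]
  by_cases h : y = x
  · subst h
    rw [if_pos rfl]
    exact List.getElem_set_self _
  · rw [if_neg h]
    exact List.getElem_set_ne (by omega) _

theorem pvSetSet (dp : List Int) (x v w : Int) (hx : 0 ≤ x) :
    PySem.List.pySetD (PySem.List.pySetD dp x v) x w = PySem.List.pySetD dp x w := by
  rw [PySem.List.pySetD_of_nonneg dp v hx, PySem.List.pySetD_of_nonneg _ w hx,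
    PySem.List.pySetD_of_nonneg dp w hx, List.set_set]

theorem pvSetGet (dp : List Int) (x : Int) (hx : 0 ≤ x) (hx2 : x < (dp.length : Int)) :
    PySem.List.pySetD dp x (PySem.List.pyGetD dp x 0) = dp := by
  rw [PySem.List.pySetD_of_nonneg dp _ hx, PySem.List.pyGetD_eq_getElem _ 0 hx hx2]
  exact List.set_getElem_self (by omega)

-- the inner loop only rewrites entry σ[i], folding the modded sum into it
theorem pvInner (c σ : List Int) (i : Int) (js : List Int) (dp : List Int)
    (hi0 : 0 ≤ i) (hilt : i < (σ.length : Int))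
    (hbnd : ∀ j ∈ js, 0 ≤ j ∧ j < i)
    (hdplen : dp.length = σ.length)
    (hidx : ∀ p : Nat, p < σ.length → 0 ≤ σ.getD p 0 ∧ σ.getD p 0 < (σ.length : Int))
    (hinj : ∀ p q : Nat, p < σ.length → q < σ.length → p ≠ q → σ.getD p 0 ≠ σ.getD q 0)
    (hfin : ∀ p : Nat, p < i.toNat → PySem.List.pyGetD dp (σ.getD p 0) 0 = pvDval c σ p) :
    js.foldl (fun dp j =>
      if PySem.List.pyGetD c (PySem.List.pyGetD σ j 0) 0 <
         PySem.List.pyGetD c (PySem.List.pyGetD σ i 0) 0 then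
        PySem.List.pySetD dp (PySem.List.pyGetD σ i 0)
          (PySem.Int.mod (PySem.List.pyGetD dp (PySem.List.pyGetD σ i 0) 0 +
                          PySem.List.pyGetD dp (PySem.List.pyGetD σ j 0) 0) pvMOD)
      else dp) dp
    = PySem.List.pySetD dp (PySem.List.pyGetD σ i 0)
        (js.foldl (fun a j =>
          if pvVal c σ j.toNat < pvVal c σ i.toNat
          then PySem.Int.mod (a + pvDval c σ j.toNat) pvMOD else a)
          (PySem.List.pyGetD dp (PySem.List.pyGetD σ i 0) 0)) := by
  induction js generalizing dp with
  | nil =>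
    simp only [List.foldl_nil]
    rw [PySem.List.pyGetD_of_nonneg σ 0 hi0]
    rcases hidx i.toNat (by omega) with ⟨hx, hx2⟩
    rw [pvSetGet dp _ hx (by omega)]
  | cons j js ih =>
    rcases hbnd j (List.mem_cons_self) with ⟨hj0, hji⟩
    have hbnd' : ∀ j' ∈ js, 0 ≤ j' ∧ j' < i := fun j' hj' => hbnd j' (List.mem_cons_of_mem _ hj')
    have hσi : PySem.List.pyGetD σ i 0 = σ.getD i.toNat 0 := PySem.List.pyGetD_of_nonneg σ 0 hi0
    have hσj : PySem.List.pyGetD σ j 0 = σ.getD j.toNat 0 := PySem.List.pyGetD_of_nonneg σ 0 hj0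
    rcases hidx i.toNat (by omega) with ⟨hxi, hxi2⟩
    rcases hidx j.toNat (by omega) with ⟨hxj, hxj2⟩
    have hvj : PySem.List.pyGetD c (PySem.List.pyGetD σ j 0) 0 = pvVal c σ j.toNat := by
      rw [hσj]; rfl
    have hvi : PySem.List.pyGetD c (PySem.List.pyGetD σ i 0) 0 = pvVal c σ i.toNat := by
      rw [hσi]; rfl
    simp only [List.foldl_cons]
    by_cases hcond : PySem.List.pyGetD c (PySem.List.pyGetD σ j 0) 0 <
        PySem.List.pyGetD c (PySem.List.pyGetD σ i 0) 0
    · have hcond' : pvVal c σ j.toNat < pvVal c σ i.toNat := by rw [← hvj, ← hvi]; exact hcond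
      rw [if_pos hcond, if_pos hcond']
      have hdj : PySem.List.pyGetD dp (PySem.List.pyGetD σ j 0) 0 = pvDval c σ j.toNat := by
        rw [hσj]; exact hfin j.toNat (by omega)
      rw [hdj]
      set v1 := PySem.Int.mod (PySem.List.pyGetD dp (PySem.List.pyGetD σ i 0) 0 +
        pvDval c σ j.toNat) pvMOD with hv1
      have hlen' : (PySem.List.pySetD dp (PySem.List.pyGetD σ i 0) v1).length = σ.length := by
        rw [PySem.List.length_pySetD]; exact hdplen
      have hfin' : ∀ p : Nat, p < i.toNat →
          PySem.List.pyGetD (PySem.List.pySetD dp (PySem.List.pyGetD σ i 0) v1)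
            (σ.getD p 0) 0 = pvDval c σ p := by
        intro p hp
        rcases hidx p (by omega) with ⟨hxp, hxp2⟩
        rw [hσi, pvGetSet dp _ _ v1 (by omega) (by omega) hxp (by omega)]
        rw [if_neg (hinj p i.toNat (by omega) (by omega) (by omega))]
        exact hfin p hp
      rw [ih _ hbnd' hlen' hfin']
      have hcur : PySem.List.pyGetD (PySem.List.pySetD dp (PySem.List.pyGetD σ i 0) v1)
          (PySem.List.pyGetD σ i 0) 0 = v1 := by
        rw [hσi, pvGetSet dp _ _ v1 (by omega) (by omega) (by omega) (by omega), if_pos rfl]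
      rw [hcur, hσi, pvSetSet dp _ _ _ (by omega)]
    · have hcond' : ¬ (pvVal c σ j.toNat < pvVal c σ i.toNat) := by
        rw [← hvj, ← hvi]; exact hcond
      rw [if_neg hcond, if_neg hcond']
      exact ih _ hbnd' hdplen hfin

-- the outer loop: after processing positions i0, …, n-1 every entry is final
theorem pvOuter (c σ : List Int)
    (hidx : ∀ p : Nat, p < σ.length → 0 ≤ σ.getD p 0 ∧ σ.getD p 0 < (σ.length : Int))
    (hinj : ∀ p q : Nat, p < σ.length → q < σ.length → p ≠ q → σ.getD p 0 ≠ σ.getD q 0) :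
    ∀ (k i0 : Nat) (dp : List Int), i0 + k = σ.length → 1 ≤ i0 → dp.length = σ.length →
    (∀ p : Nat, p < σ.length →
      PySem.List.pyGetD dp (σ.getD p 0) 0 = if p < i0 then pvDval c σ p else pvBase σ p) →
    ((PySem.List.pyRange (i0 : Int) (σ.length : Int) 1).foldl (fun dp i =>
      (PySem.List.pyRange 0 i 1).foldl (fun dp j =>
        if PySem.List.pyGetD c (PySem.List.pyGetD σ j 0) 0 <
           PySem.List.pyGetD c (PySem.List.pyGetD σ i 0) 0 then
          PySem.List.pySetD dp (PySem.List.pyGetD σ i 0)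
            (PySem.Int.mod (PySem.List.pyGetD dp (PySem.List.pyGetD σ i 0) 0 +
                            PySem.List.pyGetD dp (PySem.List.pyGetD σ j 0) 0) pvMOD)
        else dp) dp) dp).length = σ.length ∧
    (∀ p : Nat, p < σ.length →
      PySem.List.pyGetD ((PySem.List.pyRange (i0 : Int) (σ.length : Int) 1).foldl (fun dp i =>
        (PySem.List.pyRange 0 i 1).foldl (fun dp j =>
          if PySem.List.pyGetD c (PySem.List.pyGetD σ j 0) 0 <
             PySem.List.pyGetD c (PySem.List.pyGetD σ i 0) 0 then
            PySem.List.pySetD dp (PySem.List.pyGetD σ i 0)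
              (PySem.Int.mod (PySem.List.pyGetD dp (PySem.List.pyGetD σ i 0) 0 +
                              PySem.List.pyGetD dp (PySem.List.pyGetD σ j 0) 0) pvMOD)
          else dp) dp) dp) (σ.getD p 0) 0 = pvDval c σ p) := by
  intro k
  induction k with
  | zero =>
    intro i0 dp hk h1 hlen hInv
    rw [PySem.List.pyRange_one_eq_nil (by omega), List.foldl_nil]
    refine ⟨hlen, fun p hp => ?_⟩
    rw [hInv p hp, if_pos (by omega)]
  | succ k ih =>
    intro i0 dp hk h1 hlen hInv
    have hi0n : (i0 : Int) < (σ.length : Int) := by exact_mod_cast (by omega : i0 < σ.length)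
    rw [PySem.List.pyRange_one_cons hi0n, List.foldl_cons]
    have hσi0 : PySem.List.pyGetD σ (i0 : Int) 0 = σ.getD i0 0 := by
      rw [PySem.List.pyGetD_of_nonneg σ 0 (by positivity), Int.toNat_natCast]
    have hfin0 : ∀ p : Nat, p < ((i0 : Int)).toNat →
        PySem.List.pyGetD dp (σ.getD p 0) 0 = pvDval c σ p := by
      intro p hp
      rw [Int.toNat_natCast] at hp
      rw [hInv p (by omega), if_pos hp]
    have hbnd : ∀ j ∈ PySem.List.pyRange 0 (i0 : Int) 1, 0 ≤ j ∧ j < (i0 : Int) :=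
      fun j hj => PySem.List.mem_pyRange_one.mp hj
    rw [pvInner c σ (i0 : Int) _ dp (by positivity) hi0n hbnd hlen hidx hinj hfin0]
    have hbase : PySem.List.pyGetD dp (PySem.List.pyGetD σ (i0 : Int) 0) 0 = pvBase σ i0 := by
      rw [hσi0, hInv i0 (by omega), if_neg (by omega)]
    have hfold : (PySem.List.pyRange 0 (i0 : Int) 1).foldl (fun a j =>
        if pvVal c σ j.toNat < pvVal c σ ((i0 : Int)).toNat
        then PySem.Int.mod (a + pvDval c σ j.toNat) pvMOD else a)
        (PySem.List.pyGetD dp (PySem.List.pyGetD σ (i0 : Int) 0) 0) = pvDval c σ i0 := by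
      rw [hbase]
      rw [pvFoldMod _ (fun j => pvVal c σ j.toNat < pvVal c σ ((i0 : Int)).toNat)
        (fun j => pvDval c σ j.toNat) _ (pvBase_nonneg σ i0) (pvBase_lt σ i0)]
      rw [show PySem.List.pyRange 0 (i0 : Int) 1 = (List.range i0).map (fun k : Nat => (k : Int))
        from PySem.List.pyRange_zero_nat i0]
      rw [List.map_map]
      have hmap : (List.range i0).map ((fun j : Int =>
            if pvVal c σ j.toNat < pvVal c σ ((i0 : Int)).toNat then pvDval c σ j.toNat else 0)
            ∘ (fun k : Nat => (k : Int)))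
          = (List.range i0).map (fun j : Nat =>
            if pvVal c σ j < pvVal c σ i0 then (pvD c σ i0).getD j 0 else 0) := by
        apply List.map_congr_left
        intro j hj
        simp only [Function.comp_apply, Int.toNat_natCast]
        rw [pvD_getD c σ (List.mem_range.mp hj)]
      rw [hmap]
      rfl
    rw [hfold]
    have hlen' : (PySem.List.pySetD dp (PySem.List.pyGetD σ (i0 : Int) 0)
        (pvDval c σ i0)).length = σ.length := by
      rw [PySem.List.length_pySetD]; exact hlen
    have hInv' : ∀ p : Nat, p < σ.length →
        PySem.List.pyGetD (PySem.List.pySetD dp (PySem.List.pyGetD σ (i0 : Int) 0)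
          (pvDval c σ i0)) (σ.getD p 0) 0
        = if p < i0 + 1 then pvDval c σ p else pvBase σ p := by
      intro p hp
      rcases hidx p hp with ⟨hxp, hxp2⟩
      rcases hidx i0 (by omega) with ⟨hxi, hxi2⟩
      rw [hσi0, pvGetSet dp _ _ _ (by omega) (by omega) hxp (by omega)]
      by_cases hpi : p = i0
      · subst hpi
        rw [if_pos rfl, if_pos (by omega)]
      · rw [if_neg (hinj p i0 hp (by omega) hpi), hInv p hp]
        by_cases hlt : p < i0
        · rw [if_pos hlt, if_pos (by omega)]
        · rw [if_neg hlt, if_neg (by omega)]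
    have hres := ih (i0 + 1) (PySem.List.pySetD dp (PySem.List.pyGetD σ (i0 : Int) 0)
      (pvDval c σ i0)) (by omega) (by omega) hlen' hInv'
    have hcast : ((i0 : Int) + 1) = (((i0 + 1 : Nat)) : Int) := by push_cast; ring
    rw [hcast]
    exact hres

theorem pvSumFinal (c dp2 : List Int) (hlen2 : dp2.length = c.length)
    (hfin2 : ∀ p : Nat, p < c.length →
      PySem.List.pyGetD dp2 ((pvSigma c).getD p 0) 0 = pvDval c (pvSigma c) p) :
    dp2.sum = ((List.range c.length).map (pvDval c (pvSigma c))).sum := by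
  conv_lhs => rw [← PySem.List.map_pyGetD_pyRange_zero' dp2 0]
  rw [hlen2]
  rw [← List.Perm.sum_eq ((pvSigma_perm c).map (fun x => PySem.List.pyGetD dp2 x 0))]
  conv_lhs => rw [int_list_eq_map_range (pvSigma c)]
  rw [List.map_map, pvSigma_length c]
  apply congrArg
  apply List.map_congr_left
  intro p hp
  exact hfin2 p (List.mem_range.mp hp)

theorem solve_eq_model (c : List Int) (hc : c ≠ []) :
    solve c = PySem.Int.mod ((List.range c.length).map (pvDval c (pvSigma c))).sum pvMOD := by
  have hn1 : 1 ≤ c.length := List.length_pos_iff.mpr hc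
  have hσlen : (pvSigma c).length = c.length := pvSigma_length c
  have hidx : ∀ p : Nat, p < (pvSigma c).length →
      0 ≤ (pvSigma c).getD p 0 ∧ (pvSigma c).getD p 0 < ((pvSigma c).length : Int) := by
    intro p hp
    have hm : (pvSigma c).getD p 0 ∈ pvSigma c := by
      rw [List.getD_eq_getElem _ _ hp]; exact List.getElem_mem _
    have h2 := pvSigma_mem c hm
    refine ⟨h2.1, ?_⟩
    rw [hσlen]
    exact h2.2
  have hinj : ∀ p q : Nat, p < (pvSigma c).length → q < (pvSigma c).length → p ≠ q →
      (pvSigma c).getD p 0 ≠ (pvSigma c).getD q 0 := by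
    intro p q hp hq hne
    rw [List.getD_eq_getElem _ _ hp, List.getD_eq_getElem _ _ hq]
    intro he
    exact hne ((List.Nodup.getElem_inj_iff (pvSigma_nodup c)).mp he)
  have hdp1len : (PySem.List.pySetD (List.replicate c.length (0 : Int)) 0 1).length
      = (pvSigma c).length := by
    rw [PySem.List.length_pySetD, List.length_replicate, hσlen]
  have hInv1 : ∀ p : Nat, p < (pvSigma c).length →
      PySem.List.pyGetD (PySem.List.pySetD (List.replicate c.length (0 : Int)) 0 1)
        ((pvSigma c).getD p 0) 0
      = if p < 1 then pvDval c (pvSigma c) p else pvBase (pvSigma c) p := by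
    intro p hp
    rcases hidx p hp with ⟨hxp, hxp2⟩
    rw [hσlen] at hxp2
    have hrep : PySem.List.pyGetD (List.replicate c.length (0 : Int))
        ((pvSigma c).getD p 0) 0 = 0 := by
      rw [PySem.List.pyGetD_eq_getElem _ 0 hxp (by simpa using hxp2)]
      exact List.getElem_replicate _
    have hentry : PySem.List.pyGetD (PySem.List.pySetD (List.replicate c.length (0 : Int)) 0 1)
        ((pvSigma c).getD p 0) 0 = pvBase (pvSigma c) p := by
      rw [pvGetSet _ 0 _ 1 (le_refl 0) (by rw [List.length_replicate]; exact_mod_cast hn1) hxp (by simpa using hxp2), hrep]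
      rfl
    rw [hentry]
    by_cases hp1 : p < 1
    · have hp0 : p = 0 := by omega
      subst hp0
      rw [if_pos hp1]
      have hd0 : pvDval c (pvSigma c) 0
          = PySem.Int.mod (pvBase (pvSigma c) 0 + 0) pvMOD := rfl
      rw [hd0, add_zero, PySem.Int.mod_eq_emod_of_pos pvMOD_pos,
        Int.emod_eq_of_lt (pvBase_nonneg _ _) (pvBase_lt _ _)]
    · rw [if_neg hp1]
  have hout := pvOuter c (pvSigma c) hidx hinj (c.length - 1) 1 _ (by omega) (le_refl 1)
    hdp1len hInv1
  rw [Nat.cast_one, hσlen] at hout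
  rcases hout with ⟨hlen2, hfin2⟩
  show PySem.Int.mod ((PySem.List.pyRange 1 (c.length : Int) 1).foldl (fun dp i =>
      (PySem.List.pyRange 0 i 1).foldl (fun dp j =>
        if PySem.List.pyGetD c (PySem.List.pyGetD (pvSigma c) j 0) 0 <
           PySem.List.pyGetD c (PySem.List.pyGetD (pvSigma c) i 0) 0 then
          PySem.List.pySetD dp (PySem.List.pyGetD (pvSigma c) i 0)
            (PySem.Int.mod (PySem.List.pyGetD dp (PySem.List.pyGetD (pvSigma c) i 0) 0 +
                            PySem.List.pyGetD dp (PySem.List.pyGetD (pvSigma c) j 0) 0) pvMOD)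
        else dp) dp)
      (PySem.List.pySetD (List.replicate c.length (0 : Int)) 0 1)).sum pvMOD = _
  congr 1
  exact pvSumFinal c _ hlen2 hfin2

theorem pvG_perm (c0 : Int) {s t : List Int} (h : s.Perm t) (w : Option Int) :
    pvG c0 s w = pvG c0 t w := by
  unfold pvG
  rw [List.toFinset_eq_of_perm _ _ h]
  exact Finset.prod_congr rfl (fun u _ => by rw [h.count_eq])

-- ---- Layer 2: G-identities ----

theorem pvLtW_trans {u vp : Int} {w : Option Int} (h : u < vp) (hw : pvLtW vp w = true) :
    pvLtW u w = true := by
  cases w with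
  | none => rfl
  | some b => simp only [pvLtW, decide_eq_true_eq] at *; omega

theorem pvG_all_le (c0 : Int) (s : List Int) (w : Option Int) (h : ∀ u ∈ s, u ≤ c0) :
    pvG c0 s w = 1 := by
  unfold pvG
  rw [Finset.filter_eq_empty_iff.mpr, Finset.prod_empty]
  intro u hu
  have := h u (List.mem_toFinset.mp hu)
  intro hc
  omega

-- appending an element that the filter rejects changes nothing
theorem pvG_snoc_skip (c0 : Int) (s : List Int) (vp : Int) (w : Option Int)
    (hskip : ¬ (c0 < vp ∧ pvLtW vp w = true)) : pvG c0 (s ++ [vp]) w = pvG c0 s w := by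
  unfold pvG
  have hne : ∀ u : Int, c0 < u → pvLtW u w = true → u ≠ vp := by
    rintro u hc hl rfl; exact hskip ⟨hc, hl⟩
  have hfil : (s ++ [vp]).toFinset.filter (fun u => c0 < u ∧ pvLtW u w = true)
      = s.toFinset.filter (fun u => c0 < u ∧ pvLtW u w = true) := by
    ext u
    simp only [Finset.mem_filter, List.mem_toFinset, List.mem_append, List.mem_singleton]
    constructor
    · rintro ⟨hu | rfl, hc, hl⟩
      · exact ⟨hu, hc, hl⟩
      · exact absurd rfl (hne _ hc hl)
    · rintro ⟨hu, hc, hl⟩; exact ⟨Or.inl hu, hc, hl⟩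
  rw [hfil]
  apply Finset.prod_congr rfl
  intro u hu
  rcases Finset.mem_filter.mp hu with ⟨_, hc, hl⟩
  rw [List.count_append, List.count_singleton]
  simp [(hne u hc hl).symm]

theorem pvG_top (c0 : Int) (s : List Int) (vp : Int) (w : Option Int)
    (hub : ∀ u ∈ s, u ≤ vp) (hc0 : c0 < vp) (hw : pvLtW vp w = true) :
    pvG c0 s w = pvG c0 s (some vp) * ((s.count vp : Int) + 1) := by
  unfold pvG
  by_cases hvp : vp ∈ s
  · have hfil : s.toFinset.filter (fun u => c0 < u ∧ pvLtW u w = true)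
        = insert vp (s.toFinset.filter (fun u => c0 < u ∧ pvLtW u (some vp) = true)) := by
      ext u
      simp only [Finset.mem_filter, Finset.mem_insert, List.mem_toFinset, pvLtW,
        decide_eq_true_eq]
      constructor
      · rintro ⟨hu, hc, hl⟩
        rcases eq_or_lt_of_le (hub u hu) with rfl | hlt
        · exact Or.inl rfl
        · exact Or.inr ⟨hu, hc, hlt⟩
      · rintro (rfl | ⟨hu, hc, hlt⟩)
        · exact ⟨hvp, hc0, by simpa [pvLtW] using hw⟩
        · exact ⟨hu, hc, by simpa [pvLtW] using pvLtW_trans hlt hw⟩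
    rw [hfil, Finset.prod_insert (by simp [pvLtW])]
    ring
  · have hfil : s.toFinset.filter (fun u => c0 < u ∧ pvLtW u w = true)
        = s.toFinset.filter (fun u => c0 < u ∧ pvLtW u (some vp) = true) := by
      ext u
      simp only [Finset.mem_filter, List.mem_toFinset, pvLtW, decide_eq_true_eq]
      constructor
      · rintro ⟨hu, hc, hl⟩
        have : u ≠ vp := fun h => hvp (h ▸ hu)
        exact ⟨hu, hc, lt_of_le_of_ne (hub u hu) this⟩
      · rintro ⟨hu, hc, hlt⟩
        exact ⟨hu, hc, by simpa [pvLtW] using pvLtW_trans hlt hw⟩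
    rw [hfil, List.count_eq_zero.mpr hvp]
    ring

theorem pvG_snoc_top (c0 : Int) (s : List Int) (vp : Int) (w : Option Int)
    (hub : ∀ u ∈ s, u ≤ vp) (hc0 : c0 < vp) (hw : pvLtW vp w = true) :
    pvG c0 (s ++ [vp]) w = pvG c0 s (some vp) * ((s.count vp : Int) + 2) := by
  unfold pvG
  have hfil : (s ++ [vp]).toFinset.filter (fun u => c0 < u ∧ pvLtW u w = true)
      = insert vp (s.toFinset.filter (fun u => c0 < u ∧ pvLtW u (some vp) = true)) := by
    ext u
    simp only [Finset.mem_filter, Finset.mem_insert, List.mem_toFinset, List.mem_append,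
      List.mem_singleton, pvLtW, decide_eq_true_eq]
    constructor
    · rintro ⟨hu | rfl, hc, hl⟩
      · rcases eq_or_lt_of_le (hub u hu) with rfl | hlt
        · exact Or.inl rfl
        · exact Or.inr ⟨hu, hc, hlt⟩
      · exact Or.inl rfl
    · rintro (rfl | ⟨hu, hc, hlt⟩)
      · exact ⟨Or.inr rfl, hc0, by simpa [pvLtW] using hw⟩
      · exact ⟨Or.inl hu, hc, by simpa [pvLtW] using pvLtW_trans hlt hw⟩
  rw [hfil, Finset.prod_insert (by simp [pvLtW])]
  have hcnt : ∀ u ∈ s.toFinset.filter (fun u => c0 < u ∧ pvLtW u (some vp) = true),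
      (((s ++ [vp]).count u : Int) + 1) = ((s.count u : Int) + 1) := by
    intro u hu
    rcases Finset.mem_filter.mp hu with ⟨_, _, hl⟩
    have hne : u ≠ vp := by
      simp only [pvLtW, decide_eq_true_eq] at hl; omega
    rw [List.count_append, List.count_singleton]
    simp [hne.symm]
  rw [Finset.prod_congr rfl hcnt, List.count_append, List.count_singleton]
  simp only [BEq.rfl, if_true]
  push_cast
  ring

-- ---- Layer 2: the main induction ----

theorem modM_modeq (x : Int) : PySem.Int.mod x pvMOD ≡ x [ZMOD pvMOD] := by
  rw [PySem.Int.mod_eq_emod_of_pos pvMOD_pos]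
  exact Int.emod_emod_of_dvd x dvd_rfl

theorem pvMain (c σ : List Int)
    (hnd : σ.Nodup)
    (hmono : ∀ j p : Nat, j ≤ p → p < σ.length → pvVal c σ j ≤ pvVal c σ p)
    (p : Nat) (hpn : p ≤ σ.length) (w : Option Int) :
    ((List.range p).map (fun j => if pvLtW (pvVal c σ j) w then pvDval c σ j else 0)).sum
      ≡ (if (∃ j, j < p ∧ σ.getD j 0 = 0) ∧ pvLtW (PySem.List.pyGetD c 0 0) w
          then pvG (PySem.List.pyGetD c 0 0) ((List.range p).map (pvVal c σ)) w else 0)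
        [ZMOD pvMOD] := by
  induction p generalizing w with
  | zero => simp
  | succ p ih =>
    have hplen : p < σ.length := hpn
    have hpn' : p ≤ σ.length := le_of_lt hplen
    have hub : ∀ u ∈ (List.range p).map (pvVal c σ), u ≤ pvVal c σ p := by
      intro u hu
      rcases List.mem_map.mp hu with ⟨j, hj, rfl⟩
      exact hmono j p (le_of_lt (List.mem_range.mp hj)) hplen
    -- the dp value of position p, modulo pvMOD
    have hDval : pvDval c σ p ≡ pvBase σ p +
        ((List.range p).map (fun j => if pvLtW (pvVal c σ j) (some (pvVal c σ p))
          then pvDval c σ j else 0)).sum [ZMOD pvMOD] := by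
      have hmapeq : (List.range p).map
            (fun j => if pvVal c σ j < pvVal c σ p then (pvD c σ p).getD j 0 else 0)
          = (List.range p).map
            (fun j => if pvLtW (pvVal c σ j) (some (pvVal c σ p)) then pvDval c σ j else 0) := by
        apply List.map_congr_left
        intro j hj
        rw [pvD_getD c σ (List.mem_range.mp hj)]
        simp [pvLtW]
      have h0 : pvDval c σ p = PySem.Int.mod (pvBase σ p +
          ((List.range p).map (fun j => if pvLtW (pvVal c σ j) (some (pvVal c σ p))
            then pvDval c σ j else 0)).sum) pvMOD := by
        rw [pvDval, hmapeq]
      rw [h0]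
      exact modM_modeq _
    -- split the sum and the value list at position p
    rw [List.range_succ, List.map_append, List.map_append, List.sum_append]
    simp only [List.map_cons, List.map_nil, List.sum_cons, List.sum_nil, add_zero]
    by_cases hz : σ.getD p 0 = 0
    · -- position p is original index 0: its dp value is ≡ 1, no earlier seed exists
      have hbase : pvBase σ p = 1 := by unfold pvBase; rw [if_pos hz]
      have hval : pvVal c σ p = PySem.List.pyGetD c 0 0 := by unfold pvVal; rw [hz]
      have hnE : ¬ (∃ j, j < p ∧ σ.getD j 0 = 0) := by
        rintro ⟨j, hj, hzj⟩
        have h1 : σ.getD j 0 = σ[j] := List.getD_eq_getElem _ _ (by omega)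
        have h2 : σ.getD p 0 = σ[p] := List.getD_eq_getElem _ _ hplen
        have he : σ[j] = σ[p] := by rw [← h1, ← h2, hzj, hz]
        have := (List.Nodup.getElem_inj_iff hnd).mp he
        omega
      have hIv := ih hpn' (some (pvVal c σ p))
      rw [if_neg (fun h => hnE h.1)] at hIv
      have hdp1 : pvDval c σ p ≡ 1 [ZMOD pvMOD] := by
        refine hDval.trans ?_
        rw [hbase]
        simpa using Int.ModEq.add_left 1 hIv
      have hE1 : ∃ j, j < p + 1 ∧ σ.getD j 0 = 0 := ⟨p, Nat.lt_succ_self p, hz⟩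
      have hLHS0 := ih hpn' w
      rw [if_neg (fun h => hnE h.1)] at hLHS0
      by_cases hw : pvLtW (PySem.List.pyGetD c 0 0) w = true
      · have hR : (if (∃ j, j < p + 1 ∧ σ.getD j 0 = 0) ∧ pvLtW (PySem.List.pyGetD c 0 0) w
            then pvG (PySem.List.pyGetD c 0 0)
              ((List.range p).map (pvVal c σ) ++ [pvVal c σ p]) w else 0)
            = pvG (PySem.List.pyGetD c 0 0)
              ((List.range p).map (pvVal c σ) ++ [pvVal c σ p]) w := if_pos ⟨hE1, hw⟩
        rw [hR]
        have hG1 : pvG (PySem.List.pyGetD c 0 0)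
            ((List.range p).map (pvVal c σ) ++ [pvVal c σ p]) w = 1 := by
          apply pvG_all_le
          intro u hu
          rcases List.mem_append.mp hu with hu | hu
          · exact le_trans (hub u hu) (le_of_eq hval)
          · rw [List.mem_singleton.mp hu, hval]
        rw [hG1]
        have hL : (if pvLtW (pvVal c σ p) w then pvDval c σ p else 0) = pvDval c σ p :=
          if_pos (by rw [hval]; exact hw)
        rw [hL]
        simpa using Int.ModEq.add hLHS0 hdp1
      · have hR : (if (∃ j, j < p + 1 ∧ σ.getD j 0 = 0) ∧ pvLtW (PySem.List.pyGetD c 0 0) w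
            then pvG (PySem.List.pyGetD c 0 0)
              ((List.range p).map (pvVal c σ) ++ [pvVal c σ p]) w else 0) = 0 :=
          if_neg (fun h => hw h.2)
        rw [hR]
        have hL : (if pvLtW (pvVal c σ p) w then pvDval c σ p else 0) = 0 :=
          if_neg (by rw [hval]; exact hw)
        rw [hL, add_zero]
        exact hLHS0
    · -- position p is not original index 0
      have hbase : pvBase σ p = 0 := by unfold pvBase; rw [if_neg hz]
      have hEiff : (∃ j, j < p + 1 ∧ σ.getD j 0 = 0) ↔ (∃ j, j < p ∧ σ.getD j 0 = 0) := by
        constructor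
        · rintro ⟨j, hj, hzj⟩
          rcases Nat.lt_succ_iff_lt_or_eq.mp hj with hj | rfl
          · exact ⟨j, hj, hzj⟩
          · exact absurd hzj hz
        · rintro ⟨j, hj, hzj⟩; exact ⟨j, Nat.lt_succ_of_lt hj, hzj⟩
      have hdp : pvDval c σ p ≡ (if (∃ j, j < p ∧ σ.getD j 0 = 0) ∧
          pvLtW (PySem.List.pyGetD c 0 0) (some (pvVal c σ p))
          then pvG (PySem.List.pyGetD c 0 0) ((List.range p).map (pvVal c σ)) (some (pvVal c σ p))
          else 0) [ZMOD pvMOD] := by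
        refine hDval.trans ?_
        rw [hbase, zero_add]
        exact ih hpn' (some (pvVal c σ p))
      by_cases hw : pvLtW (pvVal c σ p) w = true
      · have hL : (if pvLtW (pvVal c σ p) w then pvDval c σ p else 0) = pvDval c σ p :=
          if_pos hw
        rw [hL]
        by_cases hc : PySem.List.pyGetD c 0 0 < pvVal c σ p
        · have hcw : pvLtW (PySem.List.pyGetD c 0 0) w = true := pvLtW_trans hc hw
          have hcv : pvLtW (PySem.List.pyGetD c 0 0) (some (pvVal c σ p)) = true := by
            simp only [pvLtW, decide_eq_true_eq]; exact hc
          by_cases hE : ∃ j, j < p ∧ σ.getD j 0 = 0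
          · rw [if_pos ⟨hE, hcv⟩] at hdp
            have hIw := ih hpn' w
            rw [if_pos ⟨hE, hcw⟩] at hIw
            have hR : (if (∃ j, j < p + 1 ∧ σ.getD j 0 = 0) ∧ pvLtW (PySem.List.pyGetD c 0 0) w
                then pvG (PySem.List.pyGetD c 0 0)
                  ((List.range p).map (pvVal c σ) ++ [pvVal c σ p]) w else 0)
                = pvG (PySem.List.pyGetD c 0 0)
                  ((List.range p).map (pvVal c σ) ++ [pvVal c σ p]) w :=
              if_pos ⟨hEiff.mpr hE, hcw⟩
            rw [hR, pvG_snoc_top _ _ _ _ hub hc hw]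
            have h2 := Int.ModEq.add hIw hdp
            rw [pvG_top _ _ _ _ hub hc hw] at h2
            rw [show ∀ x y : Int, x * (y + 2) = x * (y + 1) + x from fun x y => by ring]
            exact h2
          · rw [if_neg (fun h => hE h.1)] at hdp
            have hIw := ih hpn' w
            rw [if_neg (fun h => hE h.1)] at hIw
            have hR : (if (∃ j, j < p + 1 ∧ σ.getD j 0 = 0) ∧ pvLtW (PySem.List.pyGetD c 0 0) w
                then pvG (PySem.List.pyGetD c 0 0)
                  ((List.range p).map (pvVal c σ) ++ [pvVal c σ p]) w else 0) = 0 :=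
              if_neg (fun h => hE (hEiff.mp h.1))
            rw [hR]
            simpa using Int.ModEq.add hIw hdp
        · have hdp0 : pvDval c σ p ≡ 0 [ZMOD pvMOD] := by
            refine hdp.trans ?_
            rw [if_neg]
            rintro ⟨_, hcv⟩
            simp only [pvLtW, decide_eq_true_eq] at hcv
            exact hc hcv
          have hGskip : pvG (PySem.List.pyGetD c 0 0)
              ((List.range p).map (pvVal c σ) ++ [pvVal c σ p]) w
              = pvG (PySem.List.pyGetD c 0 0) ((List.range p).map (pvVal c σ)) w :=
            pvG_snoc_skip _ _ _ _ (fun h => hc h.1)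
          have hIw := ih hpn' w
          have h2 := Int.ModEq.add hIw hdp0
          rw [add_zero] at h2
          rw [hGskip]
          simp only [hEiff]
          exact h2
      · -- the new value is not below w : it contributes nothing
        have hL : (if pvLtW (pvVal c σ p) w then pvDval c σ p else 0) = 0 := if_neg hw
        have hGskip : pvG (PySem.List.pyGetD c 0 0)
            ((List.range p).map (pvVal c σ) ++ [pvVal c σ p]) w
            = pvG (PySem.List.pyGetD c 0 0) ((List.range p).map (pvVal c σ)) w :=
          pvG_snoc_skip _ _ _ _ (fun h => hw h.2)
        rw [hL, add_zero, hGskip]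
        simp only [hEiff]
        exact ih hpn' w

-- ---- Layer 3: B computes the same product ----

theorem solve_alt_eq (c : List Int) :
    solve_alt c = PySem.Int.mod (pvG (PySem.List.pyGetD c 0 0) c none) pvMOD := by
  have h1 : c.foldl (fun (d : PySem.Dict Int Int) v => d.insert v (d.getD v 0 + 1))
      PySem.Dict.empty = PySem.Dict.counter c := rfl
  show ((c.foldl (fun (d : PySem.Dict Int Int) v => d.insert v (d.getD v 0 + 1))
      PySem.Dict.empty).items).foldl (fun ans p =>
      if p.1 > PySem.List.pyGetD c 0 0
      then PySem.Int.mod (ans * (p.2 + 1)) pvMOD else ans) 1 = _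
  rw [h1, PySem.Dict.items_counter, List.foldl_map]
  have h2 : (List.foldl (fun ans k =>
        if ((k, (List.count k c : Int)) : Int × Int).1 > PySem.List.pyGetD c 0 0
        then PySem.Int.mod (ans * (((k, (List.count k c : Int)) : Int × Int).2 + 1)) pvMOD
        else ans) 1 (PySem.Set.ofList c))
      = (PySem.Set.ofList c).foldl (fun ans u =>
        if PySem.List.pyGetD c 0 0 < u
        then PySem.Int.mod (ans * ((List.count u c : Int) + 1)) pvMOD else ans) 1 := rfl
  rw [h2, pvFoldModMul _ (fun u => PySem.List.pyGetD c 0 0 < u) _ 1 (by norm_num)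
    (by norm_num [pvMOD]), one_mul]
  congr 1
  have hnd : ((PySem.Set.ofList c).filter
      (fun u => decide (PySem.List.pyGetD c 0 0 < u))).Nodup :=
    (PySem.Set.nodup_ofList c).filter _
  rw [← List.prod_toFinset _ hnd]
  unfold pvG
  have hfs : ((PySem.Set.ofList c).filter
        (fun u => decide (PySem.List.pyGetD c 0 0 < u))).toFinset
      = c.toFinset.filter (fun u => PySem.List.pyGetD c 0 0 < u ∧ pvLtW u none = true) := by
    ext u
    simp [PySem.Set.mem_ofList, pvLtW]
  rw [hfs]

-- ---- assembling ----

theorem solve_eq_solve_alt (c : List Int) (hc : c ≠ []) : solve c = solve_alt c := by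
  have hn1 : 1 ≤ c.length := List.length_pos_iff.mpr hc
  have hσlen : (pvSigma c).length = c.length := pvSigma_length c
  have hmono : ∀ j p : Nat, j ≤ p → p < (pvSigma c).length →
      pvVal c (pvSigma c) j ≤ pvVal c (pvSigma c) p :=
    fun _ _ hj hp => pvSigma_val_mono c hj hp
  have hmain := pvMain c (pvSigma c) (pvSigma_nodup c) hmono (pvSigma c).length
    (le_refl _) none
  have hL : ((List.range (pvSigma c).length).map (fun j =>
        if pvLtW (pvVal c (pvSigma c) j) none then pvDval c (pvSigma c) j else 0))
      = (List.range (pvSigma c).length).map (pvDval c (pvSigma c)) := by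
    apply List.map_congr_left
    intro j _
    exact if_pos rfl
  rw [hL] at hmain
  have hE : ∃ j, j < (pvSigma c).length ∧ (pvSigma c).getD j 0 = 0 := by
    have h0 : (0 : Int) ∈ pvSigma c := by
      rw [(pvSigma_perm c).mem_iff, PySem.List.mem_pyRange_one]
      exact ⟨le_refl 0, by exact_mod_cast hn1⟩
    rcases List.mem_iff_getElem.mp h0 with ⟨j, hj, hje⟩
    exact ⟨j, hj, by rw [List.getD_eq_getElem _ _ hj, hje]⟩
  rw [if_pos ⟨hE, rfl⟩] at hmain
  have hvs : ((List.range (pvSigma c).length).map (pvVal c (pvSigma c))).Perm c := by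
    have h1 : (List.range (pvSigma c).length).map (pvVal c (pvSigma c))
        = (pvSigma c).map (fun x => PySem.List.pyGetD c x 0) := by
      conv_rhs => rw [int_list_eq_map_range (pvSigma c)]
      rw [List.map_map]
      rfl
    rw [h1]
    have h2 := (pvSigma_perm c).map (fun x => PySem.List.pyGetD c x 0)
    rw [PySem.List.map_pyGetD_pyRange_zero' c 0] at h2
    exact h2
  rw [pvG_perm _ hvs none] at hmain
  rw [solve_eq_model c hc, solve_alt_eq c, hσlen] at *
  rw [PySem.Int.mod_eq_emod_of_pos pvMOD_pos, PySem.Int.mod_eq_emod_of_pos pvMOD_pos]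
  exact hmain

-- ===== VERDICT (by name: the statement is the Claim_ definition above) =====
theorem solve_spec : Claim_equal_solve := by
  intro c _ hpre
  unfold Spec_solve
  exact solve_eq_solve_alt c hpre
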